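-- pv_equiv track=rewrite | github.com/sakshi2912/PascalCompiler | Code Opt/code.py | exists_rhs
-- ===== SOURCE A (Python) =====
-- def exists_rhs(lines, lhs, start):
--
--     for i in range(len(lines)-1, start-1, -1):
--
--         if(len(lines[i].split()) == 5):
--             rhs1 = lines[i].split()[2]
--             rhs2 = lines[i].split()[4]
--
--             if(rhs1 == lhs or rhs2 == lhs):
--                 return i
--
--         elif(len(lines[i].split()) == 3):
--             rhs = lines[i].split()[2]
--             if(rhs == lhs):
--                 return i
--
--         elif(len(lines[i].split()) == 4):
--
--             rhs = lines[i].split()[1]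
--
--             l1 = ""
--
--             l2 = ""
--             fl = 0
--             for x in rhs:
--                 if x in [">", "<", "=", "!"]:
--                     fl = 1
--                     continue
--                 if (x == "="):
--                     continue
--                 if(fl == 0):
--                     l1 = l1 + x
--                 if(fl == 1):
--                     l2 = l2 + x
--             if(l1 == lhs or l2 == lhs):
--                 return i
--     return -1
-- ===== SOURCE B (Python) =====
-- OPS = "><=!"
--
-- def _refs(line, lhs):
--     toks = line.split()
--     n = len(toks)
--     if n == 5:
--         return lhs in (toks[2], toks[4])
--     if n == 3:
--         return toks[2] == lhs
--     if n == 4: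
--         rhs = toks[1]
--         k = 0
--         while k < len(rhs) and rhs[k] not in OPS:
--             k += 1
--         l1 = rhs[:k]
--         l2 = "".join(c for c in rhs[k:] if c not in OPS)
--         return lhs in (l1, l2)
--     return False
--
-- def exists_rhs(lines, lhs, start):
--     result = -1
--     for i in range(start, len(lines)):
--         if _refs(lines[i], lhs):
--             result = i
--     return result
-- ===== Notes on version B (the rewrite author's own statement) =====
-- stated objective: alternative
-- what changed: Backward scan with early return on first match is replaced by a forward scan keeping the last matching index, with the per-line check factored into a helper whose len==4 token parser finds the first operator position and uses slice/filter instead of A's flag-driven character fold.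
-- outside the precondition, e.g. on exists_rhs(['x := y'], 'y', -5): A returns 0, B raises IndexError
import Mathlib
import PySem

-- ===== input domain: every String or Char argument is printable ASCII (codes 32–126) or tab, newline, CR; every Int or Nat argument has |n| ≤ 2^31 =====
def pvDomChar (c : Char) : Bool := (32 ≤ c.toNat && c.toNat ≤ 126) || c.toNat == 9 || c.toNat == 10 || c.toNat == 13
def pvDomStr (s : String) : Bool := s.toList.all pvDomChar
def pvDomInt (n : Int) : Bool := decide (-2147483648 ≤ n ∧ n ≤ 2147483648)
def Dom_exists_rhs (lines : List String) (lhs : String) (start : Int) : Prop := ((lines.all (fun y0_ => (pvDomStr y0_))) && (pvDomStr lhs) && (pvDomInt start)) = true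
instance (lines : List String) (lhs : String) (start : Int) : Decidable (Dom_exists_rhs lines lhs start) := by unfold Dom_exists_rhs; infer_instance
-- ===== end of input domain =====

-- B scans forward keeping the last matching index (A scans backward with early return);
-- B's len==4 parser uses first-operator-index + take/drop/filter instead of A's flag fold. Objective: alternative.


-- ===== PORT A =====
-- the operator-character list [">", "<", "=", "!"] of A (B's Python spells the same set as the string "><=!")
def pvOps : List Char := ['>', '<', '=', '!']

-- A's inner character loop over rhs: state (l1, l2, fl), 'continue' on operator chars
def pvAParse : List Char → List Char → List Char → Int → List Char × List Char
  | [], l1, l2, _ => (l1, l2)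
  | x :: xs, l1, l2, fl =>
    if x ∈ pvOps then pvAParse xs l1 l2 1
    else if x = '=' then pvAParse xs l1 l2 fl   -- A's dead second 'continue' branch, kept literally
    else pvAParse xs (if fl = 0 then l1 ++ [x] else l1) (if fl = 1 then l2 ++ [x] else l2) fl

-- A's per-line body (token indexing is in range because the length is tested first)
def pvACheck (line lhs : String) : Bool :=
  let toks := PySem.Str.split₀ line
  if toks.length = 5 then
    let rhs1 := toks.getD 2 ""
    let rhs2 := toks.getD 4 ""
    rhs1 == lhs || rhs2 == lhs
  else if toks.length = 3 then
    let rhs := toks.getD 2 ""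
    rhs == lhs
  else if toks.length = 4 then
    let rhs := toks.getD 1 ""
    let p := pvAParse rhs.toList [] [] 0
    String.mk p.1 == lhs || String.mk p.2 == lhs
  else false

-- A's backward loop with early return
def pvALoop (lines : List String) (lhs : String) : List Int → Int
  | [] => -1
  | i :: rest =>
    match PySem.List.pyGet? lines i with
    | none => -1   -- Python raises IndexError here; excluded by Pre_
    | some line => if pvACheck line lhs then i else pvALoop lines lhs rest

def exists_rhs (lines : List String) (lhs : String) (start : Int) : Int :=
  pvALoop lines lhs (PySem.List.pyRange ((lines.length : Int) - 1) (start - 1) (-1))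

-- ===== PORT B =====
-- index of the first operator character of rhs (Source B's while loop)
def pvFirstOp : List Char → Nat
  | [] => 0
  | c :: cs => if c ∈ pvOps then 0 else pvFirstOp cs + 1

-- Source B's _refs helper
def pvRefs (line lhs : String) : Bool :=
  let toks := PySem.Str.split₀ line
  let n := toks.length
  if n = 5 then lhs == toks.getD 2 "" || lhs == toks.getD 4 ""
  else if n = 3 then toks.getD 2 "" == lhs
  else if n = 4 then
    let rhs := (toks.getD 1 "").toList
    let k := pvFirstOp rhs
    lhs == String.mk (rhs.take k) || lhs == String.mk ((rhs.drop k).filter (fun c => !(c ∈ pvOps)))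
  else false

-- Source B's forward loop with 'result' accumulator
def pvBLoop (lines : List String) (lhs : String) : List Int → Int → Int
  | [], result => result
  | i :: rest, result =>
    match PySem.List.pyGet? lines i with
    | none => pvBLoop lines lhs rest result   -- Python raises IndexError here; excluded by Pre_
    | some line => pvBLoop lines lhs rest (if pvRefs line lhs then i else result)

def exists_rhs_alt (lines : List String) (lhs : String) (start : Int) : Int :=
  pvBLoop lines lhs (PySem.List.pyRange start (lines.length : Int) 1) (-1)

-- ===== PRECONDITION & SPEC =====
-- Pre_ excludes start < -len(lines): there Python's negative-index wraparound walks off the front of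
-- the list, so A raises IndexError whenever no line matches (and B's forward scan raises at once).
def Pre_exists_rhs (lines : List String) (lhs : String) (start : Int) : Prop :=
  -(lines.length : Int) ≤ start

instance (lines : List String) (lhs : String) (start : Int) : Decidable (Pre_exists_rhs lines lhs start) := by
  unfold Pre_exists_rhs; infer_instance

def pvWitness_exists_rhs : List String × String × Int := (["x := y", "z := y + w"], "y", 0)

def Spec_exists_rhs (lines : List String) (lhs : String) (start : Int) (out : Int) : Prop :=
  out = exists_rhs_alt lines lhs start

instance (lines : List String) (lhs : String) (start : Int) (out : Int) : Decidable (Spec_exists_rhs lines lhs start out) := by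
  unfold Spec_exists_rhs; infer_instance

-- ===== CLAIM (what is proved, stated in full; the proofs are below) =====
def Claim_equal_exists_rhs : Prop := ∀ (lines : List String) (lhs : String) (start : Int), Dom_exists_rhs lines lhs start → Pre_exists_rhs lines lhs start → Spec_exists_rhs lines lhs start (exists_rhs lines lhs start)

-- ===== LEMMAS AND PROOFS =====

-- once fl = 1, A's fold only appends the non-operator characters to l2
theorem pvAParse_one (cs : List Char) : ∀ l1 l2 : List Char,
    pvAParse cs l1 l2 1 = (l1, l2 ++ cs.filter (fun c => !(c ∈ pvOps))) := by
  induction cs with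
  | nil => intro l1 l2; simp [pvAParse]
  | cons c cs ih =>
    intro l1 l2
    by_cases h : c ∈ pvOps
    · simp [pvAParse, h, ih]
    · have hne : c ≠ '=' := by intro he; exact h (by simp [he, pvOps])
      simp [pvAParse, h, hne, ih]

-- from fl = 0, A's fold computes (take to first operator, filtered remainder)
theorem pvAParse_zero (cs : List Char) : ∀ l1 l2 : List Char,
    pvAParse cs l1 l2 0 =
      (l1 ++ cs.take (pvFirstOp cs), l2 ++ (cs.drop (pvFirstOp cs)).filter (fun c => !(c ∈ pvOps))) := by
  induction cs with
  | nil => intro l1 l2; simp [pvAParse, pvFirstOp]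
  | cons c cs ih =>
    intro l1 l2
    by_cases h : c ∈ pvOps
    · simp [pvAParse, pvFirstOp, h, pvAParse_one]
    · have hne : c ≠ '=' := by intro he; exact h (by simp [he, pvOps])
      simp [pvAParse, pvFirstOp, h, hne, ih]

-- String == is symmetric
theorem pvBeq_comm (a b : String) : (a == b) = (b == a) := by
  by_cases h : a = b
  · subst h; rfl
  · have h' : ¬ b = a := fun e => h e.symm
    simp [h, h']

-- the two per-line checks agree
theorem pvACheck_eq_pvRefs (line lhs : String) : pvACheck line lhs = pvRefs line lhs := by
  simp only [pvACheck, pvRefs]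
  split_ifs with h5 h3 h4
  · rw [pvBeq_comm, pvBeq_comm ((PySem.Str.split₀ line).getD 4 "")]
  · rfl
  · rw [pvAParse_zero]
    simp only [List.nil_append]
    rw [pvBeq_comm, pvBeq_comm (String.mk _)]
  · rfl

-- appending one index on the right of B's loop
theorem pvBLoop_append (lines : List String) (lhs : String) (xs : List Int) (i : Int) :
    ∀ r : Int, pvBLoop lines lhs (xs ++ [i]) r =
      match PySem.List.pyGet? lines i with
      | none => pvBLoop lines lhs xs r
      | some line => if pvRefs line lhs then i else pvBLoop lines lhs xs r := by
  induction xs with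
  | nil => intro r; cases h : PySem.List.pyGet? lines i <;> simp [pvBLoop, h]
  | cons x xs ih =>
    intro r
    cases hx : PySem.List.pyGet? lines x <;> simp [pvBLoop, hx, ih]

-- first match scanning L = last match scanning L.reverse, when every index of L is valid
theorem pvALoop_eq_pvBLoop_reverse (lines : List String) (lhs : String) :
    ∀ L : List Int, (∀ j ∈ L, (PySem.List.pyGet? lines j).isSome) →
      pvALoop lines lhs L = pvBLoop lines lhs L.reverse (-1) := by
  intro L
  induction L with
  | nil => intro _; simp [pvALoop, pvBLoop]
  | cons i rest ih =>
    intro hall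
    have hi : (PySem.List.pyGet? lines i).isSome := hall i (by simp)
    obtain ⟨line, hline⟩ := Option.isSome_iff_exists.mp hi
    rw [List.reverse_cons, pvBLoop_append, hline]
    simp only [pvALoop, hline, pvACheck_eq_pvRefs]
    by_cases hm : pvRefs line lhs
    · simp [hm]
    · simp [hm, ih (fun j hj => hall j (by simp [hj]))]

-- ===== VERDICT (by name: the statement is the Claim_ definition above) =====
theorem exists_rhs_spec : Claim_equal_exists_rhs := by
  intro lines lhs start _ hpre
  unfold Spec_exists_rhs exists_rhs exists_rhs_alt
  have hrev : PySem.List.pyRange ((lines.length : Int) - 1) (start - 1) (-1) =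
      (PySem.List.pyRange start (lines.length : Int) 1).reverse := by
    rw [PySem.List.pyRange_neg_one_eq_reverse]
    norm_num
  rw [hrev, pvALoop_eq_pvBLoop_reverse lines lhs _ ?_, List.reverse_reverse]
  intro j hj
  rw [List.mem_reverse, PySem.List.mem_pyRange_one] at hj
  rw [Option.isSome_iff_ne_none]
  intro hnone
  rw [PySem.List.pyGet?_eq_none_iff] at hnone
  unfold Pre_exists_rhs at hpre
  exact hnone (by constructor <;> omega)
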